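-- pv_equiv track=rewrite | github.com/JerusalemProgramming/Qualified.io | p_specificity_final_productionready.py | fn_CountSelectors
-- ===== SOURCE A (Python) =====
-- def fn_CountSelectors(ListMasterX):
--
--     ## DECLARE VARIABLES
--     CountIDsX = 0
--     CountClassesX = 0
--     CountElementsX = 0
--
--     ## BEGIN FOR LOOP SELECTOR ListMasterA OR ListMasterB - COUNT SELECTORS
--     for each in ListMasterX:
--
--         if each[0] == '#':
--             CountIDsX += 1
--
--         elif each[0] == '.':
--             CountClassesX += 1
--
--         else:
--             CountElementsX += 1
--
--     ## END FOR LOOP SELECTOR ListMasterA OR ListMasterB - COUNT SELECTORS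
--
--     ## RETURN VARIABLES
--     return(CountIDsX, CountClassesX, CountElementsX)
-- ===== SOURCE B (Python) =====
-- def fn_CountSelectors(ListMasterX):
--     n = len(ListMasterX)
--     if n == 0:
--         return (0, 0, 0)
--     if n == 1:
--         c = ListMasterX[0][0]
--         if c == '#':
--             return (1, 0, 0)
--         if c == '.':
--             return (0, 1, 0)
--         return (0, 0, 1)
--     mid = n // 2
--     i1, c1, e1 = fn_CountSelectors(ListMasterX[:mid])
--     i2, c2, e2 = fn_CountSelectors(ListMasterX[mid:])
--     return (i1 + i2, c1 + c2, e1 + e2)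
-- ===== Notes on version B (the rewrite author's own statement) =====
-- stated objective: alternative
-- what changed: B counts by divide-and-conquer: it recursively splits the list into halves, classifies single selectors at the leaves, and sums the (id, class, element) triples of the halves, instead of A's single left-to-right loop with three accumulators.
import Mathlib
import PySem

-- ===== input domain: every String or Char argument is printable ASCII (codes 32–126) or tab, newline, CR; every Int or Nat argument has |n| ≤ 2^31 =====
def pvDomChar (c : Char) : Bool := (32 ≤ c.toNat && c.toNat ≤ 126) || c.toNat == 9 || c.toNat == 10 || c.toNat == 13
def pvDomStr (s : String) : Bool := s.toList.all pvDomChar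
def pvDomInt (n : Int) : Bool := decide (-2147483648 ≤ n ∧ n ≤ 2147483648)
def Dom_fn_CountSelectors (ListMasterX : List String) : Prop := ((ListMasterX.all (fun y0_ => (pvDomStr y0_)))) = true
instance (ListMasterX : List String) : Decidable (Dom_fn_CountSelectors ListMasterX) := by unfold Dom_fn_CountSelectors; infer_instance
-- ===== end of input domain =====

-- B counts by divide-and-conquer over list halves, summing (id, class, element) triples,
-- instead of A's single left-to-right loop with three accumulators (alternative decomposition).


-- ===== PORT A =====
-- each[0] is PySem.Str.pyGet?; the 'none' (IndexError) case is unreachable under Pre_.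
def fn_CountSelectors (ListMasterX : List String) : Int × Int × Int :=
  ListMasterX.foldl
    (fun (acc : Int × Int × Int) each =>
      match PySem.Str.pyGet? each 0 with
      | some c =>
        if c = '#' then (acc.1 + 1, acc.2.1, acc.2.2)
        else if c = '.' then (acc.1, acc.2.1 + 1, acc.2.2)
        else (acc.1, acc.2.1, acc.2.2 + 1)
      | none => acc)
    (0, 0, 0)

-- ===== PORT B =====
-- divide and conquer; ListMasterX[0][0] is pyGet?.getD (the 'none' IndexError case is
-- unreachable under Pre_); slices via PySem.List.slice, '//' via PySem.Int.floordiv.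
def fn_CountSelectors_alt (ListMasterX : List String) : Int × Int × Int :=
  if ListMasterX.length = 0 then (0, 0, 0)
  else if ListMasterX.length = 1 then
    let s := (PySem.List.pyGet? ListMasterX 0).getD ""
    let c := (PySem.Str.pyGet? s 0).getD ' '
    if c = '#' then (1, 0, 0)
    else if c = '.' then (0, 1, 0)
    else (0, 0, 1)
  else
    let mid : Int := PySem.Int.floordiv (ListMasterX.length : Int) 2
    let l := fn_CountSelectors_alt (PySem.List.slice ListMasterX none (some mid))
    let r := fn_CountSelectors_alt (PySem.List.slice ListMasterX (some mid) none)
    (l.1 + r.1, l.2.1 + r.2.1, l.2.2 + r.2.2)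
termination_by ListMasterX.length
decreasing_by
  · have h : PySem.Int.floordiv (ListMasterX.length : Int) 2 = ((ListMasterX.length / 2 : Nat) : Int) := by
      exact_mod_cast PySem.Int.floordiv_natCast ListMasterX.length 2
    rw [h, PySem.List.slice_to_natCast, List.length_take]
    omega
  · have h : PySem.Int.floordiv (ListMasterX.length : Int) 2 = ((ListMasterX.length / 2 : Nat) : Int) := by
      exact_mod_cast PySem.Int.floordiv_natCast ListMasterX.length 2
    rw [h, PySem.List.slice_from_natCast, List.length_drop]
    omega

-- ===== PRECONDITION & SPEC =====
-- Pre_ excludes lists containing an empty string, on which both A and B raise IndexError at s[0].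
def Pre_fn_CountSelectors (ListMasterX : List String) : Prop :=
  ∀ s ∈ ListMasterX, s ≠ ""
instance (ListMasterX : List String) : Decidable (Pre_fn_CountSelectors ListMasterX) := by
  unfold Pre_fn_CountSelectors; infer_instance
def pvWitness_fn_CountSelectors : List String := ["#main", ".nav", "div"]

def Spec_fn_CountSelectors (ListMasterX : List String) (out : Int × Int × Int) : Prop :=
  out = fn_CountSelectors_alt ListMasterX
instance (ListMasterX : List String) (out : Int × Int × Int) :
    Decidable (Spec_fn_CountSelectors ListMasterX out) := by
  unfold Spec_fn_CountSelectors; infer_instance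

-- ===== CLAIM (what is proved, stated in full; the proofs are below) =====
def Claim_equal_fn_CountSelectors : Prop :=
  ∀ (ListMasterX : List String), Dom_fn_CountSelectors ListMasterX →
    Pre_fn_CountSelectors ListMasterX →
    Spec_fn_CountSelectors ListMasterX (fn_CountSelectors ListMasterX)

-- ===== LEMMAS AND PROOFS =====

-- first character of each selector (total helper used only in the proofs)
def pvFirst (s : String) : Char := (PySem.Str.pyGet? s 0).getD ' '

-- the common closed form: counts of '#' and '.' among first characters, rest by subtraction
def pvCnt (xs : List String) : Int × Int × Int :=
  (((xs.map pvFirst).count '#' : Int),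
   ((xs.map pvFirst).count '.' : Int),
   (xs.length : Int) - ((xs.map pvFirst).count '#' : Int)
     - ((xs.map pvFirst).count '.' : Int))

-- A's fold, started from any accumulator, adds the closed-form counts.
theorem fold_A_eq (xs : List String) (a b c : Int) (hne : ∀ s ∈ xs, s ≠ "") :
    xs.foldl
      (fun (acc : Int × Int × Int) each =>
        match PySem.Str.pyGet? each 0 with
        | some ch =>
          if ch = '#' then (acc.1 + 1, acc.2.1, acc.2.2)
          else if ch = '.' then (acc.1, acc.2.1 + 1, acc.2.2)
          else (acc.1, acc.2.1, acc.2.2 + 1)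
        | none => acc)
      (a, b, c)
    = (a + (pvCnt xs).1, b + (pvCnt xs).2.1, c + (pvCnt xs).2.2) := by
  induction xs generalizing a b c with
  | nil => simp [pvCnt]
  | cons s t ih =>
    have hs : s ≠ "" := hne s (by simp)
    have ht : ∀ u ∈ t, u ≠ "" := fun u hu => hne u (by simp [hu])
    have hget : PySem.Str.pyGet? s 0 = some (pvFirst s) := by
      unfold pvFirst
      cases h : PySem.Str.pyGet? s 0 with
      | some ch => simp
      | none =>
        exfalso
        apply hs
        simp only [PySem.Str.pyGet?, PySem.Chars.pyGet?, PySem.List.pyGet?] at h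
        cases hl : s.toList with
        | nil => exact String.toList_eq_nil_iff.mp hl
        | cons ch cs => simp [hl, PySem.List.pyIdx?] at h
    simp only [List.foldl_cons, hget]
    by_cases h1 : pvFirst s = '#'
    · rw [if_pos h1, ih _ _ _ ht]
      simp only [pvCnt, Prod.mk.injEq, List.map_cons, List.length_cons]
      refine ⟨?_, ?_, ?_⟩ <;> (simp [h1]; try omega)
    · by_cases h2 : pvFirst s = '.'
      · rw [if_neg h1, if_pos h2, ih _ _ _ ht]
        simp only [pvCnt, Prod.mk.injEq, List.map_cons, List.length_cons]
        refine ⟨?_, ?_, ?_⟩ <;> (simp [h1, h2]; try omega)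
      · rw [if_neg h1, if_neg h2, ih _ _ _ ht]
        simp only [pvCnt, Prod.mk.injEq, List.map_cons, List.length_cons]
        refine ⟨?_, ?_, ?_⟩ <;> (simp [h1, h2]; try omega)

-- pvCnt is additive over append
theorem pvCnt_append (xs ys : List String) :
    pvCnt (xs ++ ys)
      = ((pvCnt xs).1 + (pvCnt ys).1, (pvCnt xs).2.1 + (pvCnt ys).2.1,
         (pvCnt xs).2.2 + (pvCnt ys).2.2) := by
  simp only [pvCnt, List.map_append, List.count_append, List.length_append]
  refine Prod.ext ?_ (Prod.ext ?_ ?_) <;> push_cast <;> ring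

-- B's divide-and-conquer computes the closed form
theorem alt_eq (xs : List String) : fn_CountSelectors_alt xs = pvCnt xs := by
  fun_induction fn_CountSelectors_alt xs with
  | case1 xs h0 =>
    obtain rfl := List.length_eq_zero_iff.mp h0
    simp [pvCnt]
  | case2 xs h0 h1 s c hc =>
    obtain ⟨t, rfl⟩ := List.length_eq_one_iff.mp h1
    have hc' : (PySem.Str.pyGet? ((PySem.List.pyGet? [t] 0).getD "") 0).getD ' ' = '#' := hc
    simp only [PySem.List.pyGet?, PySem.List.pyIdx?] at hc'
    simp_all [pvCnt, pvFirst, PySem.List.pyGet?, PySem.List.pyIdx?]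
  | case3 xs h0 h1 s c hc1 hc =>
    obtain ⟨t, rfl⟩ := List.length_eq_one_iff.mp h1
    have hc' : (PySem.Str.pyGet? ((PySem.List.pyGet? [t] 0).getD "") 0).getD ' ' = '.' := hc
    have hc1' : ¬ (PySem.Str.pyGet? ((PySem.List.pyGet? [t] 0).getD "") 0).getD ' ' = '#' := hc1
    simp only [PySem.List.pyGet?, PySem.List.pyIdx?] at hc' hc1'
    simp_all [pvCnt, pvFirst, PySem.List.pyGet?, PySem.List.pyIdx?]
  | case4 xs h0 h1 s c hc1 hc2 =>
    obtain ⟨t, rfl⟩ := List.length_eq_one_iff.mp h1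
    have hc1' : ¬ (PySem.Str.pyGet? ((PySem.List.pyGet? [t] 0).getD "") 0).getD ' ' = '#' := hc1
    have hc2' : ¬ (PySem.Str.pyGet? ((PySem.List.pyGet? [t] 0).getD "") 0).getD ' ' = '.' := hc2
    simp only [PySem.List.pyGet?, PySem.List.pyIdx?] at hc1' hc2'
    simp_all [pvCnt, pvFirst, PySem.List.pyGet?, PySem.List.pyIdx?]
  | case5 xs h0 h1 mid l r ih2 ih1 =>
    have hm : mid = ((xs.length / 2 : Nat) : Int) := by
      exact_mod_cast PySem.Int.floordiv_natCast xs.length 2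
    have hl : l = fn_CountSelectors_alt (PySem.List.slice xs none (some mid)) := rfl
    have hr : r = fn_CountSelectors_alt (PySem.List.slice xs (some mid) none) := rfl
    rw [hm, PySem.List.slice_to_natCast] at ih2 hl
    rw [hm, PySem.List.slice_from_natCast] at ih1 hr
    rw [hl, hr, ih2, ih1]
    have h := pvCnt_append (xs.take (xs.length / 2)) (xs.drop (xs.length / 2))
    rw [List.take_append_drop] at h
    rw [h]

-- ===== VERDICT (by name: the statement is the Claim_ definition above) =====
theorem fn_CountSelectors_spec : Claim_equal_fn_CountSelectors := by
  intro xs _ hpre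
  unfold Spec_fn_CountSelectors fn_CountSelectors
  rw [alt_eq xs, fold_A_eq xs 0 0 0 hpre]
  simp
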